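-- pv_equiv track=rewrite | github.com/ai4co/trajevo | trajectory_prediction/visual_with_image.py | find_multiple_valid_scenarios
-- ===== SOURCE A (Python) =====
-- def find_multiple_valid_scenarios(
--     trajectories, frame_ids, num_scenarios=3, history_len=8, future_len=12
-- ):
--     """Find frames and agents with sufficient historical and future trajectory data"""
--     valid_scenarios = []
--
--     for frame_idx in range(len(frame_ids) - history_len - future_len + 1):
--         current_frame = frame_ids[frame_idx + history_len - 1]
--
--         # Ensure we have enough historical and future frames
--         history_frames = frame_ids[frame_idx : frame_idx + history_len]
--         future_frames = frame_ids[
--             frame_idx + history_len : frame_idx + history_len + future_len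
--         ]
--
--         # Check which agents have data in all these frames
--         valid_agents = []
--         for agent_id in trajectories:
--             agent_frames = set(trajectories[agent_id].keys())
--             if all(frame in agent_frames for frame in history_frames) and all(
--                 frame in agent_frames for frame in future_frames
--             ):
--                 valid_agents.append(agent_id)
--
--         if len(valid_agents) >= 1:  # At least one agent has complete data
--             valid_scenarios.append((current_frame, valid_agents))
--
--     if not valid_scenarios:
--         return []
--
--     # Select the scenario with the most agents
--     sorted_scenarios = sorted(valid_scenarios, key=lambda x: len(x[1]), reverse=True)
--     selected_scenarios = []
--
--     selected_frames = set()
--     for frame, agents in sorted_scenarios: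
--         # if the frame is too close to any previously selected frame, skip it
--         if any(abs(frame - selected_frame) < 20 for selected_frame in selected_frames):
--             continue
--
--         # select first 8 agents
--         if len(agents) > 8:
--             agents = agents[:8]
--
--         selected_scenarios.append((frame, agents))
--         selected_frames.add(frame)
--
--         if len(selected_scenarios) >= num_scenarios:
--             break
--
--     return selected_scenarios
-- ===== SOURCE B (Python) =====
-- def find_multiple_valid_scenarios(
--     trajectories, frame_ids, num_scenarios=3, history_len=8, future_len=12
-- ):
--     """Inverted frame->agents index; each window's valid agents come from one set
--     intersection over the window's frames instead of a per-agent scan of both slices."""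
--     frame_index = {}
--     for agent_id, traj in trajectories.items():
--         for frame in traj:
--             frame_index.setdefault(frame, set()).add(agent_id)
--     agent_order = list(trajectories)
--     all_agents = set(agent_order)
--     empty = set()
--
--     valid_scenarios = []
--     for frame_idx in range(len(frame_ids) - history_len - future_len + 1):
--         window = (
--             frame_ids[frame_idx : frame_idx + history_len]
--             + frame_ids[frame_idx + history_len : frame_idx + history_len + future_len]
--         )
--         valid = all_agents
--         for frame in window:
--             valid = valid & frame_index.get(frame, empty)
--         agents = [a for a in agent_order if a in valid]
--         if agents:
--             valid_scenarios.append(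
--                 (frame_ids[frame_idx + history_len - 1], agents)
--             )
--
--     selected = []
--     chosen_frames = []
--     for frame, agents in sorted(valid_scenarios, key=lambda s: len(s[1]), reverse=True):
--         if all(abs(frame - c) >= 20 for c in chosen_frames):
--             selected.append((frame, agents[:8]))
--             chosen_frames.append(frame)
--             if len(selected) >= num_scenarios:
--                 break
--     return selected
-- ===== Notes on version B (the rewrite author's own statement) =====
-- stated objective: alternative
-- what changed: B replaces A's per-window per-agent scan over both slices with an inverted frame->agent-set index built once and a set intersection over the window's frames (agents re-ordered by dict order), and streamlines the greedy selection (list of chosen frames, unconditional agents[:8], no empty-result guard).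
import Mathlib
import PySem

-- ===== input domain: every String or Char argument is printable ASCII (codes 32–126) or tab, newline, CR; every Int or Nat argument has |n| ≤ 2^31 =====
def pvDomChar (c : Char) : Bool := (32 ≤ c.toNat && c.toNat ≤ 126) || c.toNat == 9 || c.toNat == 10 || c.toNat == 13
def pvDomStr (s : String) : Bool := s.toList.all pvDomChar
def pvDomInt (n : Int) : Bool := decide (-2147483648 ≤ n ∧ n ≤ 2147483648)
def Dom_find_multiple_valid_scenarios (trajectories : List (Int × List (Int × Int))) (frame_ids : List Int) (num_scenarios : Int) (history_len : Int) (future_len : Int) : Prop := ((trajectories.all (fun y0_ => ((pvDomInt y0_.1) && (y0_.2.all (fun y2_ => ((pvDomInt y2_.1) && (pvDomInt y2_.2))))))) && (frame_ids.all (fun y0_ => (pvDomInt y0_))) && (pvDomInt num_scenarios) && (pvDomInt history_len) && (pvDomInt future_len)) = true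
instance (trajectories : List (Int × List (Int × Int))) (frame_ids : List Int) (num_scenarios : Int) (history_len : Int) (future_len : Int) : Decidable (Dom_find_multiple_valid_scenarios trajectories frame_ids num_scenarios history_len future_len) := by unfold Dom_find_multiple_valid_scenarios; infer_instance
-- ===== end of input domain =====

-- B builds an inverted frame->agent-set index and intersects it over each window instead of
-- A's per-agent membership scan of both slices; the greedy selection keeps a plain list of
-- chosen frames and truncates agents unconditionally. Alternative decomposition, same results.

-- ===== PORT A =====
-- the for-with-break selection loop of A, as structural recursion over the sorted scenarios
def selA : List (Int × List Int) → Int → List (Int × List Int) → PySem.Set Int → List (Int × List Int)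
  | [], _, sel, _ => sel
  | (frame, agents) :: rest, num, sel, frames =>
    if frames.any (fun sf => |frame - sf| < 20) then selA rest num sel frames
    else
      let ag := if agents.length > 8 then agents.take 8 else agents
      let sel' := sel ++ [(frame, ag)]
      let frames' := PySem.Set.add frames frame
      if num ≤ (sel'.length : Int) then sel' else selA rest num sel' frames'

def find_multiple_valid_scenarios (trajectories : List (Int × List (Int × Int))) (frame_ids : List Int) (num_scenarios : Int) (history_len : Int) (future_len : Int) : List (Int × List Int) :=
  let trajD := PySem.Dict.ofList trajectories
  let valid_scenarios := (PySem.List.pyRange 0 ((frame_ids.length : Int) - history_len - future_len + 1) 1).foldl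
    (fun acc frame_idx =>
      let current_frame := (PySem.List.pyGet? frame_ids (frame_idx + history_len - 1)).getD 0  -- some under Pre_
      let history_frames := PySem.List.slice frame_ids (some frame_idx) (some (frame_idx + history_len))
      let future_frames := PySem.List.slice frame_ids (some (frame_idx + history_len)) (some (frame_idx + history_len + future_len))
      let valid_agents := trajD.keys.foldl (fun va agent_id =>
        let agent_frames := PySem.Set.ofList (PySem.Dict.ofList ((trajD.get? agent_id).getD [])).keys
        if history_frames.all (fun f => PySem.Set.contains agent_frames f) &&
           future_frames.all (fun f => PySem.Set.contains agent_frames f)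
        then va ++ [agent_id] else va) []
      if 1 ≤ valid_agents.length then acc ++ [(current_frame, valid_agents)] else acc) []
  if valid_scenarios = [] then []
  else selA (PySem.List.sorted valid_scenarios (fun x => (x.2.length : Int)) true) num_scenarios [] []

-- ===== PORT B =====
-- inverted index: frame_id -> set of agent ids present in that frame
def buildFrameIndex (trajectories : List (Int × List (Int × Int))) : PySem.Dict Int (PySem.Set Int) :=
  (PySem.Dict.ofList trajectories).items.foldl
    (fun d p => (PySem.Dict.ofList p.2).keys.foldl
      (fun d fr => d.modify fr PySem.Set.empty (fun s => PySem.Set.add s p.1)) d)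
    PySem.Dict.empty

-- B's selection loop: list of chosen frames, all-far test, unconditional take 8
def selB : List (Int × List Int) → Int → List (Int × List Int) → List Int → List (Int × List Int)
  | [], _, sel, _ => sel
  | (frame, agents) :: rest, num, sel, chosen =>
    if chosen.all (fun c => 20 ≤ |frame - c|) then
      let sel' := sel ++ [(frame, agents.take 8)]
      let chosen' := chosen ++ [frame]
      if num ≤ (sel'.length : Int) then sel' else selB rest num sel' chosen'
    else selB rest num sel chosen

def find_multiple_valid_scenarios_alt (trajectories : List (Int × List (Int × Int))) (frame_ids : List Int) (num_scenarios : Int) (history_len : Int) (future_len : Int) : List (Int × List Int) :=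
  let trajD := PySem.Dict.ofList trajectories
  let frame_index := buildFrameIndex trajectories
  let agent_order := trajD.keys
  let all_agents : PySem.Set Int := PySem.Set.ofList agent_order
  let valid_scenarios := (PySem.List.pyRange 0 ((frame_ids.length : Int) - history_len - future_len + 1) 1).foldl
    (fun acc frame_idx =>
      let window := PySem.List.slice frame_ids (some frame_idx) (some (frame_idx + history_len)) ++
                    PySem.List.slice frame_ids (some (frame_idx + history_len)) (some (frame_idx + history_len + future_len))
      let valid := window.foldl (fun s fr => PySem.Set.inter s (frame_index.getD fr PySem.Set.empty)) all_agents
      let agents := agent_order.filter (fun a => PySem.Set.contains valid a)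
      if agents.isEmpty then acc
      else acc ++ [((PySem.List.pyGet? frame_ids (frame_idx + history_len - 1)).getD 0, agents)]) []
  selB (PySem.List.sorted valid_scenarios (fun s => (s.2.length : Int)) true) num_scenarios [] []

-- ===== PRECONDITION & SPEC =====
-- Pre_ excludes exactly the inputs on which A raises IndexError at frame_ids[frame_idx+history_len-1]
-- (possible when history_len/future_len are nonpositive or exceed the frame list): the loop range must be
-- empty, or every loop index h-1 .. L-f-1 must be a valid Python index of frame_ids.
def Pre_find_multiple_valid_scenarios (trajectories : List (Int × List (Int × Int))) (frame_ids : List Int) (num_scenarios : Int) (history_len : Int) (future_len : Int) : Prop :=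
  (frame_ids.length : Int) - history_len - future_len + 1 ≤ 0 ∨
  (-(frame_ids.length : Int) ≤ history_len - 1 ∧ 0 ≤ future_len)
instance (trajectories : List (Int × List (Int × Int))) (frame_ids : List Int) (num_scenarios : Int) (history_len : Int) (future_len : Int) : Decidable (Pre_find_multiple_valid_scenarios trajectories frame_ids num_scenarios history_len future_len) := by unfold Pre_find_multiple_valid_scenarios; infer_instance

def pvWitness_find_multiple_valid_scenarios : (List (Int × List (Int × Int))) × List Int × Int × Int × Int :=
  ([(1, [(0, 0)]), (2, [(0, 5), (1, 6)])], [0, 1], 1, 1, 1)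

def Spec_find_multiple_valid_scenarios (trajectories : List (Int × List (Int × Int))) (frame_ids : List Int) (num_scenarios : Int) (history_len : Int) (future_len : Int) (out : List (Int × List Int)) : Prop := out = find_multiple_valid_scenarios_alt trajectories frame_ids num_scenarios history_len future_len
instance (trajectories : List (Int × List (Int × Int))) (frame_ids : List Int) (num_scenarios : Int) (history_len : Int) (future_len : Int) (out : List (Int × List Int)) : Decidable (Spec_find_multiple_valid_scenarios trajectories frame_ids num_scenarios history_len future_len out) := by unfold Spec_find_multiple_valid_scenarios; infer_instance

-- ===== CLAIM (what is proved, stated in full; the proofs are below) =====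
def Claim_equal_find_multiple_valid_scenarios : Prop := ∀ (trajectories : List (Int × List (Int × Int))) (frame_ids : List Int) (num_scenarios : Int) (history_len : Int) (future_len : Int), Dom_find_multiple_valid_scenarios trajectories frame_ids num_scenarios history_len future_len → Pre_find_multiple_valid_scenarios trajectories frame_ids num_scenarios history_len future_len → Spec_find_multiple_valid_scenarios trajectories frame_ids num_scenarios history_len future_len (find_multiple_valid_scenarios trajectories frame_ids num_scenarios history_len future_len)

-- ===== LEMMAS AND PROOFS =====


theorem idx_inner_mem (ks : List Int) (ag a f : Int) : ∀ (d : PySem.Dict Int (PySem.Set Int)),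
    (a ∈ (ks.foldl (fun d fr => d.modify fr PySem.Set.empty (fun s => PySem.Set.add s ag)) d).getD f PySem.Set.empty ↔
     a ∈ d.getD f PySem.Set.empty ∨ (a = ag ∧ f ∈ ks)) := by
  induction ks with
  | nil => intro d; simp
  | cons k ks ih =>
    intro d
    simp only [List.foldl_cons]
    rw [ih, PySem.Dict.getD_modify]
    by_cases hfk : f = k
    · subst hfk; simp [PySem.Set.mem_add]; tauto
    · simp [hfk]

theorem idx_outer_mem (items : List (Int × List (Int × Int))) (a f : Int) : ∀ (d : PySem.Dict Int (PySem.Set Int)),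
    a ∈ (items.foldl (fun d p => (PySem.Dict.ofList p.2).keys.foldl (fun d fr => d.modify fr PySem.Set.empty (fun s => PySem.Set.add s p.1)) d) d).getD f PySem.Set.empty ↔
    a ∈ d.getD f PySem.Set.empty ∨ ∃ p ∈ items, p.1 = a ∧ f ∈ (PySem.Dict.ofList p.2).keys := by
  induction items with
  | nil => intro d; simp
  | cons p ps ih =>
    intro d
    simp only [List.foldl_cons]
    rw [ih, idx_inner_mem]
    simp only [List.mem_cons]
    constructor
    · rintro (((h | ⟨rfl, hk⟩) | ⟨q, hq, hq1, hq2⟩))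
      · exact Or.inl h
      · exact Or.inr ⟨p, Or.inl rfl, rfl, hk⟩
      · exact Or.inr ⟨q, Or.inr hq, hq1, hq2⟩
    · rintro (h | ⟨q, (rfl | hq), hq1, hq2⟩)
      · exact Or.inl (Or.inl h)
      · exact Or.inl (Or.inr ⟨hq1.symm, hq2⟩)
      · exact Or.inr ⟨q, hq, hq1, hq2⟩

theorem inter_fold_mem (window : List Int) (g : Int → PySem.Set Int) (a : Int) : ∀ (s : PySem.Set Int),
    (a ∈ window.foldl (fun s fr => PySem.Set.inter s (g fr)) s ↔ a ∈ s ∧ ∀ fr ∈ window, a ∈ g fr) := by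
  induction window with
  | nil => intro s; simp
  | cons w ws ih =>
    intro s
    simp only [List.foldl_cons]
    rw [ih, PySem.Set.mem_inter]
    simp only [List.mem_cons]
    constructor
    · rintro ⟨⟨h1, h2⟩, h3⟩
      exact ⟨h1, by rintro fr (rfl | hfr); exact h2; exact h3 fr hfr⟩
    · rintro ⟨h1, h2⟩
      exact ⟨⟨h1, h2 w (Or.inl rfl)⟩, fun fr hfr => h2 fr (Or.inr hfr)⟩

theorem exists_items_iff (trajectories : List (Int × List (Int × Int))) (a f : Int)
    (ha : a ∈ (PySem.Dict.ofList trajectories).keys) :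
    ((∃ p ∈ (PySem.Dict.ofList trajectories).items, p.1 = a ∧ f ∈ (PySem.Dict.ofList p.2).keys) ↔
     f ∈ (PySem.Dict.ofList (((PySem.Dict.ofList trajectories).get? a).getD [])).keys) := by
  have hnd : (PySem.Dict.ofList trajectories).keys.Nodup := PySem.Dict.nodup_keys_ofList trajectories
  have hsome : ((PySem.Dict.ofList trajectories).get? a).isSome := by
    have hc : (PySem.Dict.ofList trajectories).contains a = true :=
      (PySem.Dict.contains_iff_mem_keys _ a).mpr ha
    rw [PySem.Dict.contains_eq_isSome_get?] at hc
    exact hc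
  obtain ⟨v, hv⟩ := Option.isSome_iff_exists.mp hsome
  rw [hv]
  constructor
  · rintro ⟨p, hp, hp1, hp2⟩
    have := PySem.Dict.get?_of_mem_items (PySem.Dict.ofList trajectories) (show ((p.1, p.2) : Int × List (Int × Int)) ∈ (PySem.Dict.ofList trajectories).items from hp) hnd
    rw [hp1, hv] at this
    have hv2 : p.2 = v := by injection this.symm
    rwa [hv2] at hp2
  · intro hf
    exact ⟨(a, v), PySem.Dict.mem_items_of_get?_eq_some (PySem.Dict.ofList trajectories) hv, rfl, hf⟩

theorem sel_eq (l : List (Int × List Int)) : ∀ (num : Int) (sel : List (Int × List Int)) (frames : PySem.Set Int) (chosen : List Int),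
    (∀ x, x ∈ frames ↔ x ∈ chosen) → selA l num sel frames = selB l num sel chosen := by
  induction l with
  | nil => intro num sel frames chosen _; rfl
  | cons hd rest ih =>
    obtain ⟨frame, agents⟩ := hd
    intro num sel frames chosen hmem
    simp only [selA, selB]
    by_cases hc : ∃ x ∈ chosen, |frame - x| < 20
    · have h1 : frames.any (fun sf => decide (|frame - sf| < 20)) = true := by
        rw [List.any_eq_true]
        obtain ⟨x, hx, hlt⟩ := hc
        exact ⟨x, (hmem x).mpr hx, by simpa using hlt⟩
      have h2 : chosen.all (fun c => decide (20 ≤ |frame - c|)) = false := by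
        rw [List.all_eq_false]
        obtain ⟨x, hx, hlt⟩ := hc
        exact ⟨x, hx, by simpa using hlt⟩
      rw [h1, h2]
      simp only [if_true, if_false, Bool.false_eq_true]
      exact ih num sel frames chosen hmem
    · push_neg at hc
      have h1 : frames.any (fun sf => decide (|frame - sf| < 20)) = false := by
        rw [List.any_eq_false]
        intro x hx
        simpa using hc x ((hmem x).mp hx)
      have h2 : chosen.all (fun c => decide (20 ≤ |frame - c|)) = true := by
        rw [List.all_eq_true]
        intro x hx
        simpa using hc x hx
      rw [h1, h2]
      simp only [if_true, if_false, Bool.false_eq_true]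
      have hag : (if agents.length > 8 then agents.take 8 else agents) = agents.take 8 := by
        by_cases hl : agents.length > 8
        · rw [if_pos hl]
        · rw [if_neg hl, List.take_of_length_le (Nat.le_of_not_lt hl)]
      rw [hag]
      by_cases hnum : num ≤ ((sel ++ [(frame, agents.take 8)]).length : Int)
      · simp only [if_pos hnum]
      · simp only [if_neg hnum]
        apply ih
        intro x
        rw [PySem.Set.mem_add, List.mem_append, List.mem_singleton, hmem x]

theorem cond_eq (trajectories : List (Int × List (Int × Int))) (hist fut : List Int) (a : Int)
    (ha : a ∈ (PySem.Dict.ofList trajectories).keys) :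
    ((hist.all (fun f => PySem.Set.contains (PySem.Set.ofList (PySem.Dict.ofList (((PySem.Dict.ofList trajectories).get? a).getD [])).keys) f)) &&
     (fut.all (fun f => PySem.Set.contains (PySem.Set.ofList (PySem.Dict.ofList (((PySem.Dict.ofList trajectories).get? a).getD [])).keys) f))) =
    PySem.Set.contains ((hist ++ fut).foldl (fun s fr => PySem.Set.inter s ((buildFrameIndex trajectories).getD fr PySem.Set.empty)) (PySem.Set.ofList (PySem.Dict.ofList trajectories).keys)) a := by
  have hidx : ∀ fr : Int, (a ∈ (buildFrameIndex trajectories).getD fr PySem.Set.empty ↔ fr ∈ (PySem.Dict.ofList (((PySem.Dict.ofList trajectories).get? a).getD [])).keys) := by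
    intro fr
    unfold buildFrameIndex
    rw [idx_outer_mem, ← exists_items_iff trajectories a fr ha]
    rw [PySem.Dict.getD_empty]
    simp [PySem.Set.empty]
  rw [Bool.eq_iff_iff, Bool.and_eq_true, List.all_eq_true, List.all_eq_true, PySem.Set.contains_iff, inter_fold_mem]
  simp only [PySem.Set.contains_iff, PySem.Set.mem_ofList, hidx, List.mem_append]
  constructor
  · rintro ⟨hh, hf⟩
    exact ⟨ha, fun fr hfr => hfr.elim (hh fr) (hf fr)⟩
  · rintro ⟨-, hw⟩
    exact ⟨fun fr hfr => hw fr (Or.inl hfr), fun fr hfr => hw fr (Or.inr hfr)⟩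

theorem ite_len_isEmpty (acc : List (Int × List Int)) (c : Int) (zs : List Int) :
    (if 1 ≤ zs.length then acc ++ [(c, zs)] else acc) = (if zs.isEmpty then acc else acc ++ [(c, zs)]) := by
  cases zs <;> simp

theorem final_eq (S : List (Int × List Int)) (num : Int) :
    (if S = [] then [] else selA (PySem.List.sorted S (fun x => (x.2.length : Int)) true) num [] []) =
    selB (PySem.List.sorted S (fun s => (s.2.length : Int)) true) num [] [] := by
  by_cases hS : S = []
  · subst hS; rfl
  · rw [if_neg hS]
    exact sel_eq _ num [] [] [] (fun x => Iff.rfl)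


theorem main_eq (trajectories : List (Int × List (Int × Int))) (frame_ids : List Int) (num_scenarios : Int) (history_len : Int) (future_len : Int) :
    find_multiple_valid_scenarios trajectories frame_ids num_scenarios history_len future_len =
    find_multiple_valid_scenarios_alt trajectories frame_ids num_scenarios history_len future_len := by
  simp only [find_multiple_valid_scenarios, find_multiple_valid_scenarios_alt]
  have hFG : (PySem.List.pyRange 0 ((frame_ids.length : Int) - history_len - future_len + 1) 1).foldl
      (fun acc frame_idx =>
        if 1 ≤ ((PySem.Dict.ofList trajectories).keys.foldl (fun va agent_id =>
            if (PySem.List.slice frame_ids (some frame_idx) (some (frame_idx + history_len))).all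
                 (fun f => PySem.Set.contains (PySem.Set.ofList (PySem.Dict.ofList (((PySem.Dict.ofList trajectories).get? agent_id).getD [])).keys) f) &&
               (PySem.List.slice frame_ids (some (frame_idx + history_len)) (some (frame_idx + history_len + future_len))).all
                 (fun f => PySem.Set.contains (PySem.Set.ofList (PySem.Dict.ofList (((PySem.Dict.ofList trajectories).get? agent_id).getD [])).keys) f)
            then va ++ [agent_id] else va) []).length
        then acc ++ [((PySem.List.pyGet? frame_ids (frame_idx + history_len - 1)).getD 0,
              (PySem.Dict.ofList trajectories).keys.foldl (fun va agent_id =>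
                if (PySem.List.slice frame_ids (some frame_idx) (some (frame_idx + history_len))).all
                     (fun f => PySem.Set.contains (PySem.Set.ofList (PySem.Dict.ofList (((PySem.Dict.ofList trajectories).get? agent_id).getD [])).keys) f) &&
                   (PySem.List.slice frame_ids (some (frame_idx + history_len)) (some (frame_idx + history_len + future_len))).all
                     (fun f => PySem.Set.contains (PySem.Set.ofList (PySem.Dict.ofList (((PySem.Dict.ofList trajectories).get? agent_id).getD [])).keys) f)
                then va ++ [agent_id] else va) [])] else acc) [] =
      (PySem.List.pyRange 0 ((frame_ids.length : Int) - history_len - future_len + 1) 1).foldl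
      (fun acc frame_idx =>
        if ((PySem.Dict.ofList trajectories).keys.filter (fun a =>
              PySem.Set.contains ((PySem.List.slice frame_ids (some frame_idx) (some (frame_idx + history_len)) ++
                 PySem.List.slice frame_ids (some (frame_idx + history_len)) (some (frame_idx + history_len + future_len))).foldl
                (fun s fr => PySem.Set.inter s ((buildFrameIndex trajectories).getD fr PySem.Set.empty))
                (PySem.Set.ofList (PySem.Dict.ofList trajectories).keys)) a)).isEmpty
        then acc
        else acc ++ [((PySem.List.pyGet? frame_ids (frame_idx + history_len - 1)).getD 0,
              (PySem.Dict.ofList trajectories).keys.filter (fun a =>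
              PySem.Set.contains ((PySem.List.slice frame_ids (some frame_idx) (some (frame_idx + history_len)) ++
                 PySem.List.slice frame_ids (some (frame_idx + history_len)) (some (frame_idx + history_len + future_len))).foldl
                (fun s fr => PySem.Set.inter s ((buildFrameIndex trajectories).getD fr PySem.Set.empty))
                (PySem.Set.ofList (PySem.Dict.ofList trajectories).keys)) a))])
      [] := by
    apply PySem.List.foldl_congr_mem'
    intro fi _ acc
    rw [PySem.List.foldl_append_if_eq_filter, List.nil_append,
        List.filter_congr (fun a ha => cond_eq trajectories (PySem.List.slice frame_ids (some fi) (some (fi + history_len))) (PySem.List.slice frame_ids (some (fi + history_len)) (some (fi + history_len + future_len))) a ha)]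
    exact ite_len_isEmpty acc _ _
  rw [hFG]
  exact final_eq _ num_scenarios

-- ===== VERDICT (by name: the statement is the Claim_ definition above) =====
theorem find_multiple_valid_scenarios_spec : Claim_equal_find_multiple_valid_scenarios := by
  intro t f n h fu _ _
  unfold Spec_find_multiple_valid_scenarios
  exact main_eq t f n h fu
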